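-- pv_equiv track=rewrite | github.com/nagolinc/LibraryOfLogic | examples/towerOfHanoi.py | makePrettyState
-- ===== SOURCE A (Python) =====
-- def makePrettyState(state):
--     rod1, rod2, rod3, turn = state
--     rods = [rod1, rod2, rod3]
--     max_height = max(max(len(rod) for rod in rods), 1)
--     pretty_state = ""
--
--     for i in range(max_height - 1, -1, -1):
--         for rod in rods:
--             if i < len(rod):
--                 pretty_state += "|%2d|   " % rod[i]
--             else:
--                 pretty_state += "|  |   "
--         pretty_state += "\n"
--
--     pretty_state += "Rod 1  Rod 2  Rod 3, turn: " + str(turn)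
--     return pretty_state
-- ===== SOURCE B (Python) =====
-- def makePrettyState(state):
--     rod1, rod2, rod3, turn = state
--     max_height = max(len(rod1), len(rod2), len(rod3), 1)
--     cols = []
--     for rod in (rod1, rod2, rod3):
--         cols.append(["|%2d|   " % d for d in rod]
--                     + ["|  |   "] * (max_height - len(rod)))
--     rows = [c1 + c2 + c3 for c1, c2, c3 in zip(*cols)]
--     rows.reverse()
--     return "\n".join(rows) + "\nRod 1  Rod 2  Rod 3, turn: " + str(turn)
-- ===== Notes on version B (the rewrite author's own statement) =====
-- stated objective: alternative
-- what changed: B builds a fixed-width cell column per rod (padded with blank cells to the common height), transposes the three columns with zip into rows, reverses, and joins with newlines, instead of A's character-appending double loop over heights and rods.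
import Mathlib
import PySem

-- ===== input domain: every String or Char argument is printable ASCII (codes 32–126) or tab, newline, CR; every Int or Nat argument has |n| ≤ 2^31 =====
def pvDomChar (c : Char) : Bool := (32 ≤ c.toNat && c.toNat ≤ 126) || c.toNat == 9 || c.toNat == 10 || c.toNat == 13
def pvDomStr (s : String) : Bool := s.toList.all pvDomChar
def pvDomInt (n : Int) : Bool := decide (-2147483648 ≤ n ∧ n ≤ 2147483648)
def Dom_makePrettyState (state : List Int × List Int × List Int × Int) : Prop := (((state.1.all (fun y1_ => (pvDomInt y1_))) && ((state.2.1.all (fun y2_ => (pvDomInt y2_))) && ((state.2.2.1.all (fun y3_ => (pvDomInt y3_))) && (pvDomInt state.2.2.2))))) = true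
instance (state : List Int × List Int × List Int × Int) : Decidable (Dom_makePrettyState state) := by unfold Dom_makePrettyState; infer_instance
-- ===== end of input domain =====

-- B renders the same board by building one cell column per rod and transposing, instead of A's
-- character-appending double loop over heights and rods (objective: alternative decomposition, same cost).


-- "%2d" % n : str(n) right-justified in width 2 with spaces (shared formatting helper)
def pvPad2 (n : Int) : List Char :=
  let s := PySem.Int.toChars n
  if s.length < 2 then ' ' :: s else s

-- ===== PORT A =====
-- one cell of A's inner loop body: "|%2d|   " % rod[i] if i < len(rod) else "|  |   "
def pvCellA (rod : List Int) (i : Int) : List Char :=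
  if i < (rod.length : Int) then '|' :: pvPad2 (PySem.List.pyGetD rod i 0) ++ ['|', ' ', ' ', ' ']
  else ['|', ' ', ' ', '|', ' ', ' ', ' ']

def makePrettyState (state : List Int × List Int × List Int × Int) : String :=
  let rods := [state.1, state.2.1, state.2.2.1]
  let maxHeight : Int :=
    max (max (max (state.1.length : Int) (state.2.1.length : Int)) (state.2.2.1.length : Int)) 1
  let body : List Char := (PySem.List.pyRange (maxHeight - 1) (-1) (-1)).foldl
    (fun acc i => (rods.foldl (fun acc rod => acc ++ pvCellA rod i) acc) ++ ['\n']) []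
  String.ofList (body ++ "Rod 1  Rod 2  Rod 3, turn: ".toList ++ PySem.Int.toChars state.2.2.2)

-- ===== PORT B =====
-- the full cell column of one rod, bottom-to-top, padded with blank cells up to height h
def pvCol (h : Nat) (rod : List Int) : List (List Char) :=
  rod.map (fun d => '|' :: pvPad2 d ++ ['|', ' ', ' ', ' '])
    ++ List.replicate (h - rod.length) ['|', ' ', ' ', '|', ' ', ' ', ' ']

def makePrettyState_alt (state : List Int × List Int × List Int × Int) : String :=
  let h : Nat := max (max (max state.1.length state.2.1.length) state.2.2.1.length) 1
  let rows : List (List Char) :=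
    ((pvCol h state.1).zip ((pvCol h state.2.1).zip (pvCol h state.2.2.1))).map
      (fun p => p.1 ++ p.2.1 ++ p.2.2)
  String.ofList (PySem.Chars.join ['\n'] rows.reverse
    ++ '\n' :: "Rod 1  Rod 2  Rod 3, turn: ".toList ++ PySem.Int.toChars state.2.2.2)

-- ===== PRECONDITION & SPEC =====
def Spec_makePrettyState (state : List Int × List Int × List Int × Int) (out : String) : Prop := out = makePrettyState_alt state
instance (state : List Int × List Int × List Int × Int) (out : String) : Decidable (Spec_makePrettyState state out) := by unfold Spec_makePrettyState; infer_instance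

-- ===== CLAIM (what is proved, stated in full; the proofs are below) =====
def Claim_equal_makePrettyState : Prop := ∀ (state : List Int × List Int × List Int × Int), Dom_makePrettyState state → Spec_makePrettyState state (makePrettyState state)

-- ===== LEMMAS AND PROOFS =====

-- cell at Nat height j, the common value of both sides
def pvCellN (rod : List Int) (j : Nat) : List Char :=
  if hj : j < rod.length then '|' :: pvPad2 rod[j] ++ ['|', ' ', ' ', ' ']
  else ['|', ' ', ' ', '|', ' ', ' ', ' ']

theorem cellA_natCast (rod : List Int) (j : Nat) : pvCellA rod (j : Int) = pvCellN rod j := by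
  unfold pvCellA pvCellN
  by_cases hj : j < rod.length
  · simp [hj, PySem.List.pyGetD_natCast]
  · simp [hj, show ¬ ((j : Int) < (rod.length : Int)) by exact_mod_cast hj]

theorem length_pvCol (h : Nat) (rod : List Int) (hle : rod.length ≤ h) :
    (pvCol h rod).length = h := by
  simp [pvCol]; omega

theorem pvCol_getElem (h : Nat) (rod : List Int) (_hle : rod.length ≤ h) (j : Nat) (_hj : j < h)
    (hj' : j < (pvCol h rod).length) : (pvCol h rod)[j] = pvCellN rod j := by
  unfold pvCol pvCellN
  by_cases hr : j < rod.length
  · rw [List.getElem_append_left (by simpa using hr)]; simp [hr]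
  · rw [List.getElem_append_right (by simpa using hr)]
    simp [hr, List.getElem_replicate]

theorem revmap {α : Type} (g : Nat → List α) (h : Nat) :
    (List.map g (List.range h)).reverse = List.map (fun k => g (h-1-k)) (List.range h) := by
  induction h with
  | zero => rfl
  | succ n ih =>
    conv_rhs => rw [List.range_succ_eq_map]
    rw [List.range_succ, List.map_append, List.reverse_append]
    simp only [List.map_cons, List.map_map, Nat.add_sub_cancel, Nat.sub_zero, List.map_nil,
      List.reverse_cons, List.reverse_nil, List.nil_append, List.cons_append, ih]
    congr 1
    apply List.map_congr_left; intro k hk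
    simp only [Function.comp_apply]; congr 1; omega

theorem join_append_sep (sep : List Char) (l : List (List Char)) (hne : l ≠ []) :
    PySem.Chars.join sep l ++ sep = (l.map (· ++ sep)).flatten := by
  induction l with
  | nil => exact absurd rfl hne
  | cons p rest ih =>
    cases rest with
    | nil => simp [PySem.Chars.join_singleton]
    | cons q r =>
      rw [PySem.Chars.join_cons_cons]
      simp only [List.map_cons, List.flatten_cons]
      rw [List.append_assoc, List.append_assoc, ih (by simp)]
      simp

-- B's row list is the height-indexed list of three-cell rows
theorem rows_eq (r1 r2 r3 : List Int) (h : Nat) (h1 : r1.length ≤ h) (h2 : r2.length ≤ h)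
    (h3 : r3.length ≤ h) :
    ((pvCol h r1).zip ((pvCol h r2).zip (pvCol h r3))).map (fun p => p.1 ++ p.2.1 ++ p.2.2)
      = (List.range h).map (fun j => pvCellN r1 j ++ pvCellN r2 j ++ pvCellN r3 j) := by
  apply List.ext_getElem
  · simp [length_pvCol, h1, h2, h3]
  · intro j hja hjb
    have hj : j < h := by simpa using hjb
    simp only [List.getElem_map, List.getElem_zip, List.getElem_range]
    rw [pvCol_getElem h r1 h1 j hj, pvCol_getElem h r2 h2 j hj, pvCol_getElem h r3 h3 j hj]

-- ===== VERDICT (by name: the statement is the Claim_ definition above) =====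
theorem makePrettyState_spec : Claim_equal_makePrettyState := by
  intro state _
  obtain ⟨r1, r2, r3, t⟩ := state
  unfold Spec_makePrettyState makePrettyState makePrettyState_alt
  simp only
  congr 1
  rw [List.append_cons]
  congr 1
  -- heights agree
  have hIeq : max (max (max ((r1.length : Int)) ((r2.length : Int))) ((r3.length : Int))) 1
      = ((max (max (max r1.length r2.length) r3.length) 1 : Nat) : Int) := by push_cast; rfl
  set hN : Nat := max (max (max r1.length r2.length) r3.length) 1 with hNdef
  have hh : 1 ≤ hN := le_max_right _ _
  have h1 : r1.length ≤ hN := le_trans (le_max_left _ _) (le_trans (le_max_left _ _) (le_max_left _ _))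
  have h2 : r2.length ≤ hN := le_trans (le_max_right _ _) (le_trans (le_max_left _ _) (le_max_left _ _))
  have h3 : r3.length ≤ hN := le_trans (le_max_right _ _) (le_max_left _ _)
  -- A's body as a flatten over heights, top to bottom
  have hfun : (fun (acc : List Char) (i : Int) =>
        ([r1,r2,r3].foldl (fun acc rod => acc ++ pvCellA rod i) acc) ++ ['\n'])
      = fun acc i => acc ++ (pvCellA r1 i ++ (pvCellA r2 i ++ (pvCellA r3 i ++ ['\n']))) := by
    funext acc i; simp [List.foldl]
  rw [hIeq, hfun, PySem.List.foldl_append_eq_flatMap, PySem.List.pyRange_neg_one]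
  have htn : ((hN : Int) - 1 - -1).toNat = hN := by omega
  rw [htn, List.flatMap_def, List.map_map, List.nil_append]
  -- B's body as the same flatten
  rw [rows_eq r1 r2 r3 hN h1 h2 h3]
  have hrne : ((List.range hN).map (fun j => pvCellN r1 j ++ pvCellN r2 j ++ pvCellN r3 j)).reverse ≠ [] := by
    simp; omega
  rw [join_append_sep _ _ hrne, revmap, List.map_map]
  congr 2
  apply List.map_congr_left; intro k hk
  have hk' : k < hN := List.mem_range.mp hk
  have hcast : (hN : Int) - 1 - (k : Int) = ((hN - 1 - k : Nat) : Int) := by omega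
  simp only [Function.comp_apply, hcast, cellA_natCast, List.append_assoc]
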